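-- pv_equiv track=rewrite | github.com/thedataengineer/mahabharatha | zerg/doc_engine/mermaid.py | _strip_common_prefix
-- ===== SOURCE A (Python) =====
-- def _strip_common_prefix(names: list[str]) -> dict[str, str]:
--     """Map fully-qualified module names to short forms by stripping the shared prefix.
--
--     Returns a mapping of ``{original: short}``.
--     """
--     if not names:
--         return {}
--
--     parts_list = [n.split(".") for n in names]
--     prefix_len = 0
--     for segments in zip(*parts_list):
--         if len(set(segments)) == 1:
--             prefix_len += 1
--         else:
--             break
--
--     return {name: ".".join(parts[prefix_len:]) or parts[-1] for name, parts in zip(names, parts_list)}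
-- ===== SOURCE B (Python) =====
-- def _strip_common_prefix(names: list[str]) -> dict[str, str]:
--     """Row-wise fold: shrink a candidate common segment-prefix across the lists."""
--     if not names:
--         return {}
--
--     parts_list = [n.split(".") for n in names]
--     candidate = parts_list[0]
--     for parts in parts_list[1:]:
--         k = 0
--         limit = min(len(candidate), len(parts))
--         while k < limit and candidate[k] == parts[k]:
--             k += 1
--         candidate = candidate[:k]
--         if not candidate:
--             break
--     prefix_len = len(candidate)
--
--     return {name: ".".join(parts[prefix_len:]) or parts[-1] for name, parts in zip(names, parts_list)}
-- ===== Notes on version B (the rewrite author's own statement) =====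
-- stated objective: alternative
-- what changed: Replaces the column-wise zip(*parts_list) scan (which materialises every column and tests len(set(col))==1) with a row-wise fold that shrinks a single candidate prefix list against each name, breaking early once it is empty.
import Mathlib
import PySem

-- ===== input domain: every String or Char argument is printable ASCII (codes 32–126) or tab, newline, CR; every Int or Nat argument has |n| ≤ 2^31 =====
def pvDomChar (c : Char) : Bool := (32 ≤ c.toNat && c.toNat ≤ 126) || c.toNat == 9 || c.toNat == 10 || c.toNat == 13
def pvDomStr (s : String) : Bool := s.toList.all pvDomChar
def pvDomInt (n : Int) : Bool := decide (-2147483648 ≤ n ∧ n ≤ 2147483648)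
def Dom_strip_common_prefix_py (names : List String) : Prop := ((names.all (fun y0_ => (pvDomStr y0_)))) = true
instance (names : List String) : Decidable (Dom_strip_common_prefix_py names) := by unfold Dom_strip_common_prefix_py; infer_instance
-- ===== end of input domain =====

-- B replaces A's column-wise zip(*parts_list) prefix scan by a row-wise fold shrinking one
-- candidate prefix list (same cost; a different decomposition of the common-prefix search).

-- ===== PORT A =====
-- number of columns zip(*parts_list) yields = min of the row lengths (parts_list nonempty in use)
def pvMinLen : List (List String) → Nat
  | [] => 0
  | p :: ps => ps.foldl (fun m q => min m q.length) p.length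

-- 'len(set(segments)) == 1' for column i (only used under i < pvMinLen pl, so getD never defaults)
def pvColAllEq (pl : List (List String)) (i : Nat) : Bool :=
  PySem.Set.len (PySem.Set.ofList (pl.map (fun p => p.getD i ""))) == 1

-- the 'for segments in zip(*parts_list): if … prefix_len += 1 else break' loop
def pvAGo (pl : List (List String)) (i : Nat) : Nat :=
  if i < pvMinLen pl then
    if pvColAllEq pl i then pvAGo pl (i + 1) else i
  else i
termination_by pvMinLen pl - i

-- '.'.join(parts[prefix_len:]) or parts[-1]  (split never yields [], so parts[-1] is in range)
def pvShort (k : Nat) (parts : List String) : String :=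
  let s := PySem.Str.join "." (PySem.List.slice parts (some (k : Int)) none)
  if s = "" then (PySem.List.pyGet? parts (-1)).getD "" else s

def strip_common_prefix_py (names : List String) : List (String × String) :=
  if names = [] then []
  else
    -- n.split(".") with a nonempty separator never raises: split? is always `some`
    let parts_list := names.map (fun n => (PySem.Str.split? n ".").getD [])
    let prefix_len := pvAGo parts_list 0
    ((names.zip parts_list).foldl
      (fun d nv => PySem.Dict.insert d nv.1 (pvShort prefix_len nv.2))
      PySem.Dict.empty).items

-- ===== PORT B =====
-- the inner 'while k < limit and candidate[k] == parts[k]' cut: candidate[:k]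
def pvCommonPref : List String → List String → List String
  | a :: as, b :: bs => if a = b then a :: pvCommonPref as bs else []
  | _, _ => []

-- the 'for parts in parts_list[1:]' loop with its 'if not candidate: break'
def pvBCand : List String → List (List String) → List String
  | c, [] => c
  | c, p :: ps =>
    let c' := pvCommonPref c p
    if c' = [] then [] else pvBCand c' ps

def strip_common_prefix_py_alt (names : List String) : List (String × String) :=
  if names = [] then []
  else
    let parts_list := names.map (fun n => (PySem.Str.split? n ".").getD [])
    let candidate := pvBCand (parts_list.headD []) parts_list.tail
    let prefix_len := candidate.length
    ((names.zip parts_list).foldl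
      (fun d nv => PySem.Dict.insert d nv.1 (pvShort prefix_len nv.2))
      PySem.Dict.empty).items

-- ===== PRECONDITION & SPEC =====
def Spec_strip_common_prefix_py (names : List String) (out : List (String × String)) : Prop := out = strip_common_prefix_py_alt names
instance (names : List String) (out : List (String × String)) : Decidable (Spec_strip_common_prefix_py names out) := by unfold Spec_strip_common_prefix_py; infer_instance

-- ===== CLAIM (what is proved, stated in full; the proofs are below) =====
def Claim_equal_strip_common_prefix_py : Prop := ∀ (names : List String), Dom_strip_common_prefix_py names → Spec_strip_common_prefix_py names (strip_common_prefix_py names)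

-- ===== LEMMAS AND PROOFS =====

theorem pvFoldl_commonPref_nil (ps : List (List String)) :
    ps.foldl pvCommonPref [] = [] := by
  induction ps with
  | nil => rfl
  | cons p ps ih =>
    have h : pvCommonPref [] p = [] := rfl
    rw [List.foldl_cons, h, ih]

theorem pvBCand_eq_foldl (ps : List (List String)) (c : List String) :
    pvBCand c ps = ps.foldl pvCommonPref c := by
  induction ps generalizing c with
  | nil => rfl
  | cons p ps ih =>
    simp only [pvBCand, List.foldl_cons]
    by_cases h : pvCommonPref c p = []
    · rw [if_pos h, h, pvFoldl_commonPref_nil]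
    · rw [if_neg h, ih]

-- 'i < running min' characterised
theorem pvLtFoldMin (l : List (List String)) (m i : Nat) :
    i < l.foldl (fun m q => min m q.length) m ↔ i < m ∧ ∀ q ∈ l, i < q.length := by
  induction l generalizing m with
  | nil => simp
  | cons p l ih =>
    rw [List.foldl_cons, ih]
    simp only [Nat.lt_min, List.mem_cons]
    aesop

theorem pvAGo_single (p : List String) (i : Nat) (h : i ≤ p.length) :
    pvAGo [p] i = p.length := by
  induction hn : p.length - i generalizing i with
  | zero =>
    rw [pvAGo]
    have : ¬ i < pvMinLen [p] := by simp [pvMinLen]; omega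
    rw [if_neg this]; omega
  | succ n ih =>
    rw [pvAGo]
    have hlt : i < pvMinLen [p] := by simp [pvMinLen]; omega
    rw [if_pos hlt]
    have hcol : pvColAllEq [p] i = true := by
      simp [pvColAllEq, PySem.Set.len, PySem.Set.ofList, PySem.Set.add, PySem.Set.contains]
    rw [if_pos hcol, ih (i + 1) (by omega) (by omega)]

theorem pvCommonPref_get (a b : List String) (i : Nat) (h : i < (pvCommonPref a b).length) :
    a.getD i "" = (pvCommonPref a b).getD i "" ∧ b.getD i "" = (pvCommonPref a b).getD i "" := by
  induction a generalizing b i with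
  | nil => simp [pvCommonPref] at h
  | cons x as ih =>
    cases b with
    | nil => simp [pvCommonPref] at h
    | cons y bs =>
      simp only [pvCommonPref] at h ⊢
      by_cases hxy : x = y
      · rw [if_pos hxy] at h ⊢
        cases i with
        | zero => simp [hxy]
        | succ j =>
          simp only [List.getD_cons_succ]
          exact ih bs j (by simpa using h)
      · rw [if_neg hxy] at h; simp at h

theorem pvCommonPref_length_le (a b : List String) :
    (pvCommonPref a b).length ≤ a.length ∧ (pvCommonPref a b).length ≤ b.length := by
  induction a generalizing b with
  | nil => simp [pvCommonPref]
  | cons x as ih =>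
    cases b with
    | nil => simp [pvCommonPref]
    | cons y bs =>
      simp only [pvCommonPref]
      by_cases hxy : x = y
      · rw [if_pos hxy]
        have := ih bs
        simp only [List.length_cons]
        omega
      · rw [if_neg hxy]; simp

-- at index (pvCommonPref a b).length, a and b disagree or one of them ends
theorem pvCommonPref_stop (a b : List String) :
    (pvCommonPref a b).length = a.length ∨ (pvCommonPref a b).length = b.length ∨
      a.getD (pvCommonPref a b).length "" ≠ b.getD (pvCommonPref a b).length "" := by
  induction a generalizing b with
  | nil => simp [pvCommonPref]
  | cons x as ih =>
    cases b with
    | nil => simp [pvCommonPref]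
    | cons y bs =>
      simp only [pvCommonPref]
      by_cases hxy : x = y
      · rw [if_pos hxy]
        rcases ih bs with h | h | h
        · left; simp [h]
        · right; left; simp [h]
        · right; right; simpa using h
      · rw [if_neg hxy]
        right; right; simpa using hxy

-- a column test is unchanged when the two leading rows are replaced by their common prefix,
-- as long as i stays inside that prefix
theorem pvColAllEq_cons_cons (a b : List String) (rest : List (List String)) (i : Nat)
    (hi : i < (pvCommonPref a b).length) :
    pvColAllEq (a :: b :: rest) i = pvColAllEq (pvCommonPref a b :: rest) i := by
  obtain ⟨ha, hb⟩ := pvCommonPref_get a b i hi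
  set v := (pvCommonPref a b).getD i "" with hv
  simp only [pvColAllEq, List.map_cons, ha, hb, ← hv]
  have h1 : PySem.Set.add PySem.Set.empty v = [v] := by
    simp [PySem.Set.add, PySem.Set.contains, PySem.Set.empty]
  have h2 : PySem.Set.add [v] v = [v] := by
    simp [PySem.Set.add, PySem.Set.contains]
  simp only [PySem.Set.ofList, List.foldl_cons, h1, h2]

-- a set only grows along a fold of adds
theorem pvSetAdd_mono (l : List String) (s : List String) :
    s.length ≤ (l.foldl PySem.Set.add s).length := by
  induction l generalizing s with
  | nil => exact le_refl _
  | cons x l ih =>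
    refine le_trans ?_ (ih (PySem.Set.add s x))
    simp only [PySem.Set.add]
    split <;> simp

theorem pvAGo_cons_cons (a b : List String) (rest : List (List String)) (i : Nat)
    (hi : i ≤ (pvCommonPref a b).length) :
    pvAGo (a :: b :: rest) i = pvAGo (pvCommonPref a b :: rest) i := by
  have hlen := pvCommonPref_length_le a b
  induction hn : (pvCommonPref a b).length - i generalizing i with
  | zero =>
    -- i = (pvCommonPref a b).length : both sides stop and return i
    have hie : i = (pvCommonPref a b).length := by omega
    conv_lhs => rw [pvAGo]
    conv_rhs => rw [pvAGo]
    have hR : ¬ i < pvMinLen (pvCommonPref a b :: rest) := by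
      simp only [pvMinLen, pvLtFoldMin]
      omega
    rw [if_neg hR]
    by_cases hL : i < pvMinLen (a :: b :: rest)
    · rw [if_pos hL]
      have hia : i < a.length ∧ i < b.length := by
        simp only [pvMinLen, List.foldl_cons, pvLtFoldMin, Nat.lt_min] at hL
        exact hL.1
      have hne : a.getD i "" ≠ b.getD i "" := by
        rcases pvCommonPref_stop a b with h | h | h
        · omega
        · omega
        · rw [← hie] at h; exact h
      have hcol : pvColAllEq (a :: b :: rest) i = false := by
        simp only [pvColAllEq, List.map_cons, PySem.Set.ofList, List.foldl_cons]
        have h1 : PySem.Set.add PySem.Set.empty (a.getD i "") = [a.getD i ""] := by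
          simp [PySem.Set.add, PySem.Set.contains, PySem.Set.empty]
        have h2 : PySem.Set.add [a.getD i ""] (b.getD i "") = [a.getD i "", b.getD i ""] := by
          simp [PySem.Set.add, PySem.Set.contains]
          exact Ne.symm hne
        rw [h1, h2]
        have hmono := pvSetAdd_mono (rest.map (fun p => p.getD i "")) [a.getD i "", b.getD i ""]
        simp only [List.length_cons, List.length_nil] at hmono
        simp only [PySem.Set.len]
        have hne1 : ((rest.map (fun p => p.getD i "")).foldl PySem.Set.add
            [a.getD i "", b.getD i ""]).length ≠ 1 := by omega
        simpa using hne1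
      rw [if_neg (by simp [hcol])]
    · rw [if_neg hL]
  | succ n ih =>
    have hi' : i < (pvCommonPref a b).length := by omega
    conv_lhs => rw [pvAGo]
    conv_rhs => rw [pvAGo]
    have hminEq : (i < pvMinLen (a :: b :: rest)) ↔ (i < pvMinLen (pvCommonPref a b :: rest)) := by
      simp only [pvMinLen, List.foldl_cons, pvLtFoldMin, Nat.lt_min]
      constructor
      · rintro ⟨⟨_, _⟩, h3⟩; exact ⟨hi', h3⟩
      · rintro ⟨_, h3⟩; exact ⟨⟨by omega, by omega⟩, h3⟩
    by_cases hL : i < pvMinLen (a :: b :: rest)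
    · rw [if_pos hL, if_pos (hminEq.mp hL)]
      rw [pvColAllEq_cons_cons a b rest i hi']
      by_cases hc : pvColAllEq (pvCommonPref a b :: rest) i
      · rw [if_pos hc, if_pos hc]
        exact ih (i + 1) (by omega) (by omega)
      · rw [if_neg hc, if_neg hc]
    · rw [if_neg hL, if_neg (fun h => hL (hminEq.mpr h))]

-- A's column loop computes the length of the left fold of pairwise common prefixes
theorem pvAGo_eq_foldl (p : List String) (ps : List (List String)) :
    pvAGo (p :: ps) 0 = (ps.foldl pvCommonPref p).length := by
  induction ps generalizing p with
  | nil => simpa using pvAGo_single p 0 (Nat.zero_le _)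
  | cons q ps ih =>
    rw [pvAGo_cons_cons p q ps 0 (Nat.zero_le _), List.foldl_cons, ih]

-- ===== VERDICT (by name: the statement is the Claim_ definition above) =====
theorem strip_common_prefix_py_spec : Claim_equal_strip_common_prefix_py := by
  intro names _
  unfold Spec_strip_common_prefix_py strip_common_prefix_py strip_common_prefix_py_alt
  by_cases h : names = []
  · rw [if_pos h, if_pos h]
  · rw [if_neg h, if_neg h]
    cases names with
    | nil => exact absurd rfl h
    | cons n ns =>
      simp only [List.map_cons, List.headD_cons, List.tail_cons]
      rw [pvBCand_eq_foldl, pvAGo_eq_foldl]
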